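-- pv_equiv track=rewrite | github.com/Lu4nAlmeida/3-Players-Tic-Tac-Toe | mybot.py | center_moves
-- ===== SOURCE A (Python) =====
-- def center_moves(moves):
--     center_moves = []
--     other_moves = []
--     for move in moves:
--         row, col = move
--         if (row > 0 and col > 0) and (row < 3 and col < 3):
--             center_moves.append(move)
--         else:
--             other_moves.append(move)
--
--     return center_moves + other_moves
-- ===== SOURCE B (Python) =====
-- def center_moves(moves):
--     return sorted(moves, key=lambda m: (lambda row, col: 0 if (row > 0 and col > 0) and (row < 3 and col < 3) else 1)(*m))
-- ===== Notes on version B (the rewrite author's own statement) =====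
-- stated objective: idiomatic
-- what changed: Replaces the explicit two-bucket partition loop and list concatenation with a single stable sort keyed 0 for center squares and 1 otherwise, relying on sort stability to preserve within-group order.
import Mathlib
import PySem

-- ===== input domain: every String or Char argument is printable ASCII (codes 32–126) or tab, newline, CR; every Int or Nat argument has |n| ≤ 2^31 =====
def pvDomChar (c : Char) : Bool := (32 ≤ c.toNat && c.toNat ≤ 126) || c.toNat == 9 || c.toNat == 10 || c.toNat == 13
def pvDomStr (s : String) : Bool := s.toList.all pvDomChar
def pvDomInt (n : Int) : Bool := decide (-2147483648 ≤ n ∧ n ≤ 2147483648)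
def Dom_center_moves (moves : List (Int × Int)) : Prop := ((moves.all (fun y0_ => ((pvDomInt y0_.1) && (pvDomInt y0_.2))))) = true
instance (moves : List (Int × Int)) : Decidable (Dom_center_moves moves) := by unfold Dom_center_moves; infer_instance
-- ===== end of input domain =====

-- B replaces A's two-bucket partition loop with one stable sort on a 0/1 "is not center" key (idiomatic; same return value, no speed claim).


-- ===== PORT A =====
-- A: one pass appending each move to a 'center' or an 'other' bucket, then concatenating the buckets.
def center_moves (moves : List (Int × Int)) : List (Int × Int) :=
  let p := moves.foldl
    (fun (acc : List (Int × Int) × List (Int × Int)) move =>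
      if (move.1 > 0 ∧ move.2 > 0) ∧ (move.1 < 3 ∧ move.2 < 3) then
        (acc.1 ++ [move], acc.2)
      else
        (acc.1, acc.2 ++ [move]))
    ([], [])
  p.1 ++ p.2

-- ===== PORT B =====
-- B: the sort key — 0 for a center square, 1 otherwise (the lambda in Source B).
def centerKey (m : Int × Int) : Int :=
  if (m.1 > 0 ∧ m.2 > 0) ∧ (m.1 < 3 ∧ m.2 < 3) then 0 else 1

def center_moves_alt (moves : List (Int × Int)) : List (Int × Int) :=
  PySem.List.sorted moves centerKey

-- ===== PRECONDITION & SPEC =====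
def Spec_center_moves (moves : List (Int × Int)) (out : List (Int × Int)) : Prop := out = center_moves_alt moves
instance (moves : List (Int × Int)) (out : List (Int × Int)) : Decidable (Spec_center_moves moves out) := by unfold Spec_center_moves; infer_instance

-- ===== CLAIM (what is proved, stated in full; the proofs are below) =====
def Claim_equal_center_moves : Prop := ∀ (moves : List (Int × Int)), Dom_center_moves moves → Spec_center_moves moves (center_moves moves)

-- ===== LEMMAS AND PROOFS =====

-- the two filters (centers / others) both programs' results reduce to
def filC (moves : List (Int × Int)) : List (Int × Int) := moves.filter (fun m => decide (centerKey m = 0))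
def filO (moves : List (Int × Int)) : List (Int × Int) := moves.filter (fun m => decide (centerKey m = 1))

theorem centerKey_cases (m : Int × Int) : centerKey m = 0 ∨ centerKey m = 1 := by
  unfold centerKey; split_ifs <;> simp

-- A's loop: the buckets accumulate exactly the two filters
theorem foldlA_eq (moves cs os : List (Int × Int)) :
    moves.foldl
      (fun (acc : List (Int × Int) × List (Int × Int)) move =>
        if (move.1 > 0 ∧ move.2 > 0) ∧ (move.1 < 3 ∧ move.2 < 3) then
          (acc.1 ++ [move], acc.2)
        else
          (acc.1, acc.2 ++ [move]))
      (cs, os) = (cs ++ filC moves, os ++ filO moves) := by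
  induction moves generalizing cs os with
  | nil => simp [filC, filO]
  | cons x t ih =>
    by_cases h : (x.1 > 0 ∧ x.2 > 0) ∧ (x.1 < 3 ∧ x.2 < 3)
    · have hk : centerKey x = 0 := by unfold centerKey; rw [if_pos h]
      simp only [List.foldl_cons, if_pos h, ih]
      simp [filC, filO, hk, List.append_assoc]
    · have hk : centerKey x = 1 := by unfold centerKey; rw [if_neg h]
      simp only [List.foldl_cons, if_neg h, ih]
      simp [filC, filO, hk, List.append_assoc]

-- inserting a center element into centers ++ others puts it right after the centers
theorem insert_center (x : Int × Int) (hx : centerKey x = 0)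
    (cs os : List (Int × Int)) (hc : ∀ c ∈ cs, centerKey c = 0) (ho : ∀ o ∈ os, centerKey o = 1) :
    PySem.List.insertBy (fun a b => decide (centerKey a < centerKey b)) x (cs ++ os)
      = (cs ++ [x]) ++ os := by
  induction cs with
  | nil =>
    cases os with
    | nil => simp [PySem.List.insertBy]
    | cons o os' =>
      have h1 : centerKey o = 1 := ho o (by simp)
      simp [PySem.List.insertBy, hx, h1]
  | cons c cs' ih =>
    have hc0 : centerKey c = 0 := hc c (by simp)
    have hrec := ih (fun y hy => hc y (List.mem_cons_of_mem c hy))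
    simp [PySem.List.insertBy, hx, hc0, hrec]

-- inserting a non-center element appends it at the end
theorem insert_other (x : Int × Int) (hx : centerKey x = 1) (ys : List (Int × Int)) :
    PySem.List.insertBy (fun a b => decide (centerKey a < centerKey b)) x ys = ys ++ [x] := by
  apply PySem.List.insertBy_of_forall_not_before
  intro y _
  rcases centerKey_cases y with h | h <;> simp [hx, h]

-- B's insertion sort maintains "centers so far ++ others so far"
theorem foldlB_eq (moves cs os : List (Int × Int))
    (hc : ∀ c ∈ cs, centerKey c = 0) (ho : ∀ o ∈ os, centerKey o = 1) :
    moves.foldl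
      (fun acc x => PySem.List.insertBy (fun a b => decide (centerKey a < centerKey b)) x acc)
      (cs ++ os) = (cs ++ filC moves) ++ (os ++ filO moves) := by
  induction moves generalizing cs os with
  | nil => simp [filC, filO]
  | cons x t ih =>
    rcases centerKey_cases x with hx | hx
    · rw [List.foldl_cons, insert_center x hx cs os hc ho]
      have hcs : ∀ c ∈ cs ++ [x], centerKey c = 0 := by
        intro c hcm
        rcases List.mem_append.1 hcm with h | h
        · exact hc c h
        · simp at h; simpa [h] using hx
      rw [ih (cs ++ [x]) os hcs ho]
      have h1 : filC (x :: t) = x :: filC t := by simp [filC, hx]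
      have h0 : filO (x :: t) = filO t := by simp [filO, hx]
      rw [h1, h0]
      simp [List.append_assoc]
    · rw [List.foldl_cons, insert_other x hx (cs ++ os), List.append_assoc]
      have hos : ∀ o ∈ os ++ [x], centerKey o = 1 := by
        intro o hom
        rcases List.mem_append.1 hom with h | h
        · exact ho o h
        · simp at h; simpa [h] using hx
      rw [ih cs (os ++ [x]) hc hos]
      have h1 : filC (x :: t) = filC t := by simp [filC, hx]
      have h0 : filO (x :: t) = x :: filO t := by simp [filO, hx]
      rw [h1, h0]
      simp [List.append_assoc]

-- ===== VERDICT (by name: the statement is the Claim_ definition above) =====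
theorem center_moves_spec : Claim_equal_center_moves := by
  intro moves _
  unfold Spec_center_moves center_moves center_moves_alt
  rw [PySem.List.sorted_eq_foldl_insertBy]
  have hB := foldlB_eq moves [] [] (by simp) (by simp)
  simp only [List.nil_append] at hB
  simp only [foldlA_eq moves [] [], List.nil_append, hB]
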